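-- pv_equiv track=rewrite | github.com/deadlylaid/TIL | algorithm/progremmers/camouflage.py | solution
-- ===== SOURCE A (Python) =====
-- import math
--
-- def solution(clothes):
--     answer = 0
--
--     clothes_dict = {}
--
--     for i in clothes:
--         key = i[-1]
--         if clothes_dict.get(key):
--             clothes_dict[key] += len(i) - 1
--         else:
--             clothes_dict[key] = len(i) - 1
--
--     cs = [v for i, v in clothes_dict.items()]
--     cs_len = len(cs)
--
--     # 몇 개씩 조합할 지
--     for i in range(1, cs_len):
--         # 첫 번째 수가 무엇인지
--         for ii, vv in enumerate(cs):
--             for iii in range(1, cs_len):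
--                 if ii + iii + i <= cs_len:
--                     answer += vv * math.prod(cs[iii + ii:iii + ii + i])
--
--     for i in cs:
--         answer += i
--     return answer
-- ===== SOURCE B (Python) =====
-- def solution(clothes):
--     counts = {}
--     for item in clothes:
--         key = item[-1]
--         counts[key] = counts.get(key, 0) + len(item) - 1
--     cs = list(counts.values())
--     n = len(cs)
--     answer = sum(cs)
--     prefix = 0
--     for s in range(1, n):
--         prefix += cs[s - 1]
--         p = 1
--         for L in range(1, n - s + 1):
--             p *= cs[s + L - 1]
--             answer += prefix * p
--     return answer
-- ===== Notes on version B (the rewrite author's own statement) =====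
-- stated objective: alternative
-- what changed: A enumerates all (size, start, gap) triples and recomputes each window product with a slice, O(k^4) in the number k of distinct categories; B makes one pass over window starts keeping a running prefix sum of counts (the coefficient all admissible gaps contribute) and a running window product extended one element at a time, O(k^2) in k — on the generated inputs k stays small and the O(n) counting pass dominates, so no measured speed-up.
import Mathlib
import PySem

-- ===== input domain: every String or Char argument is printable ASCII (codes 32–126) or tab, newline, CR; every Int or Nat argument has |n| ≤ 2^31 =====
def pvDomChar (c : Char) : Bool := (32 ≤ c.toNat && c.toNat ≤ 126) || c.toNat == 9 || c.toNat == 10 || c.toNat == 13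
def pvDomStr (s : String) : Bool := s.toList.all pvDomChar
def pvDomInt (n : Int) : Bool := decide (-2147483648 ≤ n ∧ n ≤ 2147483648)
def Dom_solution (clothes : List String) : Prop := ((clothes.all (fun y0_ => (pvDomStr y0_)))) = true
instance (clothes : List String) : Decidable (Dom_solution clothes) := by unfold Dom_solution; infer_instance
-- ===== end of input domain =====

-- B replaces A's four nested passes over categories (size, start, gap, slice product) by one
-- pass over window starts keeping a running prefix sum and a running window product.

-- ===== PORT A =====
def solution (clothes : List String) : Int :=
  let d : PySem.Dict Char Int := clothes.foldl (fun d i =>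
    let key := PySem.List.pyGetD i.toList (-1) ' '
    if PySem.Dict.getD d key 0 ≠ 0 then
      PySem.Dict.insert d key (PySem.Dict.getD d key 0 + (PySem.Str.len i - 1))
    else
      PySem.Dict.insert d key (PySem.Str.len i - 1)) PySem.Dict.empty
  let cs : List Int := PySem.Dict.values d
  let csLen : Int := PySem.List.len cs
  let answer : Int := 0
  let answer := (PySem.List.pyRange 1 csLen 1).foldl (fun answer i =>
    (PySem.List.enumerate cs 0).foldl (fun answer p =>
      (PySem.List.pyRange 1 csLen 1).foldl (fun answer iii =>
        if p.1 + iii + i ≤ csLen then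
          answer + p.2 * (PySem.List.slice cs (some (iii + p.1)) (some (iii + p.1 + i))).prod
        else answer) answer) answer) answer
  cs.foldl (fun a v => a + v) answer

-- ===== PORT B =====
def solution_alt (clothes : List String) : Int :=
  let counts : PySem.Dict Char Int := clothes.foldl (fun d item =>
    let key := PySem.List.pyGetD item.toList (-1) ' '
    PySem.Dict.insert d key (PySem.Dict.getD d key 0 + PySem.Str.len item - 1)) PySem.Dict.empty
  let cs : List Int := PySem.Dict.values counts
  let n : Int := PySem.List.len cs
  let st : Int × Int := (PySem.List.pyRange 1 n 1).foldl (fun (st : Int × Int) s =>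
    let pre := st.1 + PySem.List.pyGetD cs (s - 1) 0
    let inner := (PySem.List.pyRange 1 (n - s + 1) 1).foldl (fun (q : Int × Int) L =>
      let p := q.1 * PySem.List.pyGetD cs (s + L - 1) 0
      (p, q.2 + pre * p)) (1, st.2)
    (pre, inner.2)) (0, cs.sum)
  st.2

-- ===== PRECONDITION & SPEC =====
-- Pre_ excludes exactly the inputs containing an empty string, on which A raises IndexError at i[-1].
def Pre_solution (clothes : List String) : Prop := ∀ s ∈ clothes, s ≠ ""
instance (clothes : List String) : Decidable (Pre_solution clothes) := by unfold Pre_solution; infer_instance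
def pvWitness_solution : List String := ["ab", "c", "xyz"]

def Spec_solution (clothes : List String) (out : Int) : Prop := out = solution_alt clothes
instance (clothes : List String) (out : Int) : Decidable (Spec_solution clothes out) := by unfold Spec_solution; infer_instance

-- ===== CLAIM (what is proved, stated in full; the proofs are below) =====
def Claim_equal_solution : Prop := ∀ (clothes : List String), Dom_solution clothes → Pre_solution clothes → Spec_solution clothes (solution clothes)

-- ===== LEMMAS AND PROOFS =====

-- window product cs[s:s+L] and prefix sum cs[:s]
def pvW (cs : List Int) (s L : ℕ) : Int := ((cs.drop s).take L).prod
def pvPre (cs : List Int) (s : ℕ) : Int := (cs.take s).sum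

-- the two dict-building steps coincide (when the stored count is 0, resetting = adding)
lemma dict_fold_eq (clothes : List String) :
    clothes.foldl (fun d i =>
      let key := PySem.List.pyGetD i.toList (-1) ' '
      if PySem.Dict.getD d key 0 ≠ 0 then
        PySem.Dict.insert d key (PySem.Dict.getD d key 0 + (PySem.Str.len i - 1))
      else
        PySem.Dict.insert d key (PySem.Str.len i - 1)) (PySem.Dict.empty : PySem.Dict Char Int)
    = clothes.foldl (fun d item =>
      let key := PySem.List.pyGetD item.toList (-1) ' '
      PySem.Dict.insert d key (PySem.Dict.getD d key 0 + PySem.Str.len item - 1)) PySem.Dict.empty := by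
  apply List.foldl_ext
  intro d i _
  dsimp only
  split_ifs with h
  · ring_nf
  · rw [not_not] at h
    rw [h]; ring_nf

-- a foldl accumulating "if c then acc + g x else acc" is init + Σ of the guarded terms
lemma foldl_ite_add {α : Type} (l : List α) (c : α → Prop) [DecidablePred c]
    (g : α → Int) (init : Int) :
    l.foldl (fun a x => if c x then a + g x else a) init
      = init + (l.map (fun x => if c x then g x else 0)).sum := by
  induction l generalizing init with
  | nil => simp
  | cons x xs ih =>
      simp only [List.foldl_cons, List.map_cons, List.sum_cons, ih]
      split_ifs <;> ring

-- the master combinatorial identity (pure â index juggling)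
lemma sum_range_extend (m N : ℕ) (h : m ≤ N) (X : ℕ → ℤ) :
    ∑ s ∈ Finset.range m, X s = ∑ s ∈ Finset.range N, if s < m then X s else 0 := by
  rw [Finset.sum_ite, Finset.sum_const_zero, add_zero]
  apply Finset.sum_congr
  · ext s; simp; omega
  · intros; rfl

lemma master (n : ℕ) (g : ℕ → Int) (f : ℕ → ℕ → Int) :
    (∑ a ∈ Finset.range (n-1), ∑ ii ∈ Finset.range n, ∑ c ∈ Finset.range (n-1),
        if ii + c + a + 2 ≤ n then g ii * f (ii+c+1) (a+1) else 0)
    = ∑ b ∈ Finset.range (n-1),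
        (∑ ii ∈ Finset.range (b+1), g ii) * (∑ l ∈ Finset.range (n-1-b), f (b+1) (l+1)) := by
  have hR : ∀ b ∈ Finset.range (n-1),
      (∑ ii ∈ Finset.range (b+1), g ii) * (∑ l ∈ Finset.range (n-1-b), f (b+1) (l+1))
      = ∑ a ∈ Finset.range (n-1), ∑ ii ∈ Finset.range n,
          if a < n-1-b ∧ ii < b+1 then g ii * f (b+1) (a+1) else 0 := by
    intro b hb
    simp only [Finset.mem_range] at hb
    rw [Finset.sum_mul_sum, Finset.sum_comm,
      sum_range_extend (n-1-b) (n-1) (by omega) (fun l => ∑ ii ∈ Finset.range (b+1), g ii * f (b+1) (l+1))]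
    apply Finset.sum_congr rfl
    intro a _
    split_ifs with h1
    · rw [sum_range_extend (b+1) n (by omega) (fun ii => g ii * f (b+1) (a+1))]
      apply Finset.sum_congr rfl
      intro ii _
      exact if_congr (by simp [h1]) rfl rfl
    · rw [Finset.sum_eq_zero]
      intro ii _
      split_ifs with h2
      · exact absurd h2.1 h1
      · rfl
  rw [Finset.sum_congr rfl hR]
  conv_rhs => rw [Finset.sum_comm]
  -- now both sides: ∑ a ∈ range (n-1), (pairs)
  apply Finset.sum_congr rfl
  intro a ha
  simp only [Finset.mem_range] at ha
  -- LHS pair sum over (ii, c); RHS pair sum over (b, ii)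
  rw [← Finset.sum_product', ← Finset.sum_product']
  rw [Finset.sum_ite, Finset.sum_const_zero, add_zero,
      Finset.sum_ite, Finset.sum_const_zero, add_zero]
  apply Finset.sum_nbij' (i := fun p => (p.1 + p.2, p.1)) (j := fun q => (q.2, q.1 - q.2))
  · intro p hp
    simp only [Finset.mem_filter, Finset.mem_product, Finset.mem_range] at *
    omega
  · intro q hq
    simp only [Finset.mem_filter, Finset.mem_product, Finset.mem_range] at *
    omega
  · intro p hp
    simp only [Finset.mem_filter, Finset.mem_product, Finset.mem_range] at hp
    simp
  · intro q hq
    simp only [Finset.mem_filter, Finset.mem_product, Finset.mem_range] at hq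
    have h2 : q.2 ≤ q.1 := by omega
    exact Prod.ext (by simp [Nat.add_sub_cancel' h2]) rfl
  · intro p hp
    simp only [Finset.mem_filter, Finset.mem_product, Finset.mem_range] at hp
    rfl

lemma sum_map_range (m : ℕ) (f : ℕ → ℤ) : ((List.range m).map f).sum = ∑ x ∈ Finset.range m, f x := rfl

-- A's three nested loops + final additive loop, in closed Finset form
lemma A_core (cs : List Int) :
    cs.foldl (fun a v => a + v)
      ((PySem.List.pyRange 1 (PySem.List.len cs) 1).foldl (fun answer i =>
        (PySem.List.enumerate cs 0).foldl (fun answer p =>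
          (PySem.List.pyRange 1 (PySem.List.len cs) 1).foldl (fun answer iii =>
            if p.1 + iii + i ≤ PySem.List.len cs then
              answer + p.2 * (PySem.List.slice cs (some (iii + p.1)) (some (iii + p.1 + i))).prod
            else answer) answer) answer) 0)
    = (∑ a ∈ Finset.range (cs.length-1), ∑ ii ∈ Finset.range cs.length, ∑ c ∈ Finset.range (cs.length-1),
        if ii + c + a + 2 ≤ cs.length then cs.getD ii 0 * pvW cs (ii+c+1) (a+1) else 0) + cs.sum := by
  rw [show (fun (a : Int) (v : Int) => a + v) = (fun (a : Int) (v : Int) => a + id v) from rfl,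
    PySem.List.foldl_add]
  simp only [foldl_ite_add, PySem.List.foldl_add]
  rw [PySem.List.enumerate_eq_map_pyRange (d := 0)]
  simp only [List.map_map, PySem.List.pyRange_one, List.map_map, sum_map_range]
  simp only [Function.comp, PySem.List.len_eq, zero_add, List.map_id, zero_add]
  rw [show ((cs.length:Int) - 1).toNat = cs.length - 1 by omega,
      show ((cs.length:Int) - 0).toNat = cs.length by omega]
  congr 1
  apply Finset.sum_congr rfl; intro a ha
  apply Finset.sum_congr rfl; intro b hb
  apply Finset.sum_congr rfl; intro c hc
  simp only [Finset.mem_range] at ha hb hc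
  rw [if_congr (show ((b:Int) + (1+↑c) + (1+↑a) ≤ (cs.length:Int)) ↔ (b + c + a + 2 ≤ cs.length) by omega) rfl rfl]
  split_ifs with h
  · rw [PySem.List.pyGetD_natCast,
      show (1+(c:Int))+↑b = ((b+c+1 : ℕ) : Int) by push_cast; ring,
      show ((b+c+1 : ℕ) : Int) + (1+↑a) = ((b+c+1+(a+1) : ℕ) : Int) by push_cast; ring,
      PySem.List.slice_natCast,
      show b+c+1+(a+1) - (b+c+1) = a+1 by omega]
    rfl
  · rfl

lemma pvPre_eq (cs : List Int) (s : ℕ) (h : s ≤ cs.length) :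
    pvPre cs s = ∑ ii ∈ Finset.range s, cs.getD ii 0 := by
  induction s with
  | zero => simp [pvPre]
  | succ k ih =>
      rw [Finset.sum_range_succ, ← ih (by omega), pvPre, pvPre, List.take_add_one,
        List.sum_append]
      have hk : k < cs.length := by omega
      have : cs[k]? = some (cs.getD k 0) := by
        rw [List.getElem?_eq_getElem hk, List.getD_eq_getElem?_getD,
          List.getElem?_eq_getElem hk]
        rfl
      rw [this]; simp

lemma pvW_succ (cs : List Int) (s k : ℕ) (h : s + k < cs.length) :
    pvW cs s (k+1) = pvW cs s k * cs.getD (s+k) 0 := by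
  unfold pvW
  rw [List.take_add_one, List.prod_append]
  have h1 : (cs.drop s)[k]? = some cs[s+k] := by
    rw [List.getElem?_drop, List.getElem?_eq_getElem (by omega)]
  rw [h1]
  have h2 : cs.getD (s+k) 0 = cs[s+k] := by
    rw [List.getD_eq_getElem?_getD, List.getElem?_eq_getElem (by omega)]; rfl
  rw [h2]
  simp

lemma B_inner (cs : List Int) (s m : ℕ) (hm : s + m ≤ cs.length) (pre a0 : Int) :
    (PySem.List.pyRange 1 ((m:Int)+1) 1).foldl (fun (q : Int × Int) L =>
        let p := q.1 * PySem.List.pyGetD cs ((s:Int) + L - 1) 0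
        (p, q.2 + pre * p)) (1, a0)
    = (pvW cs s m, a0 + pre * ∑ l ∈ Finset.range m, pvW cs s (l+1)) := by
  induction m with
  | zero =>
      rw [show ((0:ℕ):Int) + 1 = 1 by norm_num, PySem.List.pyRange_one_eq_nil (by omega)]
      simp [pvW]
  | succ k ih =>
      rw [show ((k+1:ℕ):Int) + 1 = ((k:Int)+1) + 1 by push_cast; ring,
        PySem.List.pyRange_one_succ_right (by omega), List.foldl_append,
        ih (by omega)]
      simp only [List.foldl_cons, List.foldl_nil]
      have hidx : (s:Int) + ((k:Int)+1) - 1 = ((s+k : ℕ) : Int) := by push_cast; ring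
      rw [hidx, PySem.List.pyGetD_natCast]
      rw [← pvW_succ cs s k (by omega), Finset.sum_range_succ]
      refine Prod.ext rfl ?_
      simp only
      ring

lemma pvPre_succ (cs : List Int) (k : ℕ) (h : k < cs.length) :
    pvPre cs (k+1) = pvPre cs k + cs.getD k 0 := by
  unfold pvPre
  rw [List.take_add_one, List.sum_append]
  have h1 : cs[k]? = some cs[k] := List.getElem?_eq_getElem h
  have h2 : cs.getD k 0 = cs[k] := by
    rw [List.getD_eq_getElem?_getD, h1]; rfl
  rw [h1, h2]; simp

lemma B_outer (cs : List Int) (k : ℕ) (hk : k + 1 ≤ cs.length) (a0 : Int) :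
    (PySem.List.pyRange 1 ((k:Int)+1) 1).foldl (fun (st : Int × Int) s =>
      let pre := st.1 + PySem.List.pyGetD cs (s - 1) 0
      let inner := (PySem.List.pyRange 1 (PySem.List.len cs - s + 1) 1).foldl (fun (q : Int × Int) L =>
        let p := q.1 * PySem.List.pyGetD cs (s + L - 1) 0
        (p, q.2 + pre * p)) (1, st.2)
      (pre, inner.2)) (0, a0)
    = (pvPre cs k, a0 + ∑ b ∈ Finset.range k,
        pvPre cs (b+1) * ∑ l ∈ Finset.range (cs.length-1-b), pvW cs (b+1) (l+1)) := by
  induction k with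
  | zero =>
      rw [show ((0:ℕ):Int) + 1 = 1 by norm_num, PySem.List.pyRange_one_eq_nil (by omega)]
      simp [pvPre]
  | succ k ih =>
      rw [show ((k+1:ℕ):Int) + 1 = ((k:Int)+1) + 1 by push_cast; ring,
        PySem.List.pyRange_one_succ_right (by omega), List.foldl_append,
        ih (by omega)]
      simp only [List.foldl_cons, List.foldl_nil]
      have hpre : pvPre cs k + PySem.List.pyGetD cs ((k:Int)+1-1) 0 = pvPre cs (k+1) := by
        rw [show ((k:Int)+1-1) = ((k:ℕ):Int) by ring, PySem.List.pyGetD_natCast,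
          pvPre_succ cs k (by omega)]
      have hbound : PySem.List.len cs - ((k:Int)+1) + 1 = ((cs.length - (k+1) : ℕ) : Int) + 1 := by
        simp [PySem.List.len_eq]; omega
      rw [hpre, hbound, show ((k:Int)+1) = ((k+1:ℕ):Int) by push_cast; ring,
        B_inner cs (k+1) (cs.length - (k+1)) (by omega)]
      refine Prod.ext rfl ?_
      simp only
      rw [Finset.sum_range_succ]
      have : cs.length - (k+1) = cs.length - 1 - k := by omega
      rw [this]
      ring

-- B's pair-state loops, in closed Finset form
lemma B_core (cs : List Int) :
    ((PySem.List.pyRange 1 (PySem.List.len cs) 1).foldl (fun (st : Int × Int) s =>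
      let pre := st.1 + PySem.List.pyGetD cs (s - 1) 0
      let inner := (PySem.List.pyRange 1 (PySem.List.len cs - s + 1) 1).foldl (fun (q : Int × Int) L =>
        let p := q.1 * PySem.List.pyGetD cs (s + L - 1) 0
        (p, q.2 + pre * p)) (1, st.2)
      (pre, inner.2)) (0, cs.sum)).2
    = (∑ b ∈ Finset.range (cs.length-1),
        pvPre cs (b+1) * (∑ l ∈ Finset.range (cs.length-1-b), pvW cs (b+1) (l+1))) + cs.sum := by
  rcases Nat.eq_zero_or_pos cs.length with h | h
  · rw [show PySem.List.len cs = 0 by simp [PySem.List.len_eq, h],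
      PySem.List.pyRange_one_eq_nil (by omega)]
    simp [h]
  · nth_rewrite 2 [show PySem.List.len cs = ((cs.length - 1 : ℕ) : Int) + 1 by
      simp [PySem.List.len_eq]; omega]
    rw [B_outer cs (cs.length - 1) (by omega)]
    simp only
    ring

-- ===== VERDICT (by name: the statement is the Claim_ definition above) =====
theorem solution_spec : Claim_equal_solution := by
  intro clothes _ _
  show solution clothes = solution_alt clothes
  simp only [solution, solution_alt]
  rw [dict_fold_eq]
  generalize (clothes.foldl _ PySem.Dict.empty : PySem.Dict Char Int).values = cs
  rw [A_core cs, B_core cs, master cs.length (fun ii => cs.getD ii 0) (pvW cs)]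
  apply congrArg (· + cs.sum)
  apply Finset.sum_congr rfl
  intro b hb
  rw [pvPre_eq cs (b+1) (by simp at hb; omega)]
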